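-- pv_equiv track=rewrite | github.com/haibojin001/InductArena | BJ/create_blackjack/rules.py | SR3
-- ===== SOURCE A (Python) =====
-- def SR3(hand):
--     ranks = [c[0] for c in hand]
--     suits = [c[1] for c in hand]
--     for i in range(len(hand)):
--         for j in range(i+1, len(hand)):
--             if ranks[i] == ranks[j] and suits[i] != suits[j]:
--                 return True
--     return False
-- ===== SOURCE B (Python) =====
-- def SR3(hand):
--     pairs = sorted((c[0], c[1]) for c in hand)
--     for k in range(len(pairs) - 1):
--         if pairs[k][0] == pairs[k + 1][0] and pairs[k][1] != pairs[k + 1][1]: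
--             return True
--     return False
-- ===== Notes on version B (the rewrite author's own statement) =====
-- stated objective: faster
-- what changed: Replaces A's nested all-pairs comparison with one sort of the (rank, suit) pairs followed by a single linear scan of adjacent entries.
import Mathlib
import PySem

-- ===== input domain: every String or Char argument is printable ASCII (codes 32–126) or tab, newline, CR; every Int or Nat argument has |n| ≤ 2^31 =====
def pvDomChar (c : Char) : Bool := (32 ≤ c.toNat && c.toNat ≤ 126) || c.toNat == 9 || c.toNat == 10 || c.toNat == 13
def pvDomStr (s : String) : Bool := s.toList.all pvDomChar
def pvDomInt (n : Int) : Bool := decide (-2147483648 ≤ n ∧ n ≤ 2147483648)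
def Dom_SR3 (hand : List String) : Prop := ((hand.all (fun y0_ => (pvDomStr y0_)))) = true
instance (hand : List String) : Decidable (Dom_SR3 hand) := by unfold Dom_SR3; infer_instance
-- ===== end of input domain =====

-- B replaces A's nested all-pairs scan by sorting the (rank,suit) pairs once and checking adjacent entries.

-- ===== PORT A =====
-- Python's c[0]/c[1] raise IndexError on cards shorter than 2 characters; Pre_SR3 excludes those
-- inputs, and inside Pre_SR3 `PySem.Str.pyGet?` is always `some`, so `.getD ' '` is exact there.
-- The list indexing ranks[i]/suits[j] is always in range, so `pyGetD` is exact for it.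
def SR3 (hand : List String) : Bool :=
  let ranks := hand.map (fun c => (PySem.Str.pyGet? c 0).getD ' ')
  let suits := hand.map (fun c => (PySem.Str.pyGet? c 1).getD ' ')
  (PySem.List.pyRange 0 (hand.length : Int) 1).any (fun i =>
    (PySem.List.pyRange (i + 1) (hand.length : Int) 1).any (fun j =>
      (PySem.List.pyGetD ranks i ' ' == PySem.List.pyGetD ranks j ' ') &&
      !(PySem.List.pyGetD suits i ' ' == PySem.List.pyGetD suits j ' ')))

-- ===== PORT B =====
-- (c[0], c[1]); same IndexError domain as A, exact inside Pre_SR3 (see the comment on SR3).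
def pvCardKey (c : String) : Char × Char :=
  ((PySem.Str.pyGet? c 0).getD ' ', (PySem.Str.pyGet? c 1).getD ' ')

-- Source B's index loop over consecutive entries of `pairs`, as structural recursion on the list.
def pvAdjScan : List (Char × Char) → Bool
  | p :: q :: t => if p.1 == q.1 && !(p.2 == q.2) then true else pvAdjScan (q :: t)
  | _ => false

def SR3_alt (hand : List String) : Bool :=
  pvAdjScan (PySem.List.sorted2 (hand.map pvCardKey) Prod.fst Prod.snd)

-- ===== PRECONDITION & SPEC =====
-- Pre_SR3 excludes exactly the inputs where Python A raises IndexError (a card with fewer than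
-- 2 characters); Python B raises there as well.
def Pre_SR3 (hand : List String) : Prop := ∀ c ∈ hand, 2 ≤ PySem.Str.len c
instance (hand : List String) : Decidable (Pre_SR3 hand) := by unfold Pre_SR3; infer_instance
def pvWitness_SR3 : List String := ["7H", "7S"]

def Spec_SR3 (hand : List String) (out : Bool) : Prop := out = SR3_alt hand
instance (hand : List String) (out : Bool) : Decidable (Spec_SR3 hand out) := by unfold Spec_SR3; infer_instance

-- ===== CLAIM (what is proved, stated in full; the proofs are below) =====
def Claim_equal_SR3 : Prop := ∀ (hand : List String), Dom_SR3 hand → Pre_SR3 hand → Spec_SR3 hand (SR3 hand)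

-- ===== LEMMAS AND PROOFS =====

-- the comparison sorted2 sorts by (B's Python compares the tuples (c[0], c[1]) lexicographically)
def pvLt (a b : Char × Char) : Bool :=
  decide (a.1 < b.1) || (!decide (b.1 < a.1) && decide (a.2 < b.2))

-- "a comes no later than b" in the sorted order: the negation of pvLt b a
def pvR (a b : Char × Char) : Prop := pvLt b a = false

theorem pvR_iff (a b : Char × Char) : pvR a b ↔ a.1 < b.1 ∨ (a.1 = b.1 ∧ a.2 ≤ b.2) := by
  unfold pvR pvLt
  rcases lt_trichotomy a.1 b.1 with h | h | h
  · simp [h, lt_asymm h]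
  · simp [h, not_lt]
  · simp [h, lt_asymm h]
    intro h'
    exfalso
    rw [h'] at h
    exact lt_irrefl _ h

theorem pvR_trans {a b c : Char × Char} (h1 : pvR a b) (h2 : pvR b c) : pvR a c := by
  rw [pvR_iff] at *
  rcases h1 with h1 | ⟨h1, h1'⟩ <;> rcases h2 with h2 | ⟨h2, h2'⟩
  · exact Or.inl (lt_trans h1 h2)
  · exact Or.inl (h2 ▸ h1)
  · exact Or.inl (h1 ▸ h2)
  · exact Or.inr ⟨h1.trans h2, le_trans h1' h2'⟩

theorem pvR_fst {a b : Char × Char} (h : pvR a b) : a.1 ≤ b.1 := by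
  rw [pvR_iff] at h
  rcases h with h | ⟨h, -⟩
  · exact le_of_lt h
  · exact le_of_eq h

theorem pvLt_true_pvR {a b : Char × Char} (h : pvLt a b = true) : pvR a b := by
  rw [pvR_iff]
  unfold pvLt at h
  simp only [Bool.or_eq_true, Bool.and_eq_true, Bool.not_eq_true', decide_eq_true_eq,
    decide_eq_false_iff_not] at h
  rcases h with h | ⟨h1, h2⟩
  · exact Or.inl h
  · rcases lt_trichotomy a.1 b.1 with h3 | h3 | h3
    · exact Or.inl h3
    · exact Or.inr ⟨h3, le_of_lt h2⟩
    · exact absurd h3 h1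

theorem pvInsertBy_nil (x : Char × Char) : PySem.List.insertBy pvLt x [] = [x] := rfl

theorem pvInsertBy_cons (x y : Char × Char) (ys : List (Char × Char)) :
    PySem.List.insertBy pvLt x (y :: ys) =
      if pvLt x y then x :: y :: ys else y :: PySem.List.insertBy pvLt x ys := rfl

theorem pvPairwise_insertBy (x : Char × Char) (l : List (Char × Char))
    (h : l.Pairwise pvR) : (PySem.List.insertBy pvLt x l).Pairwise pvR := by
  induction l with
  | nil => simp [pvInsertBy_nil]
  | cons y ys ih =>
    rw [pvInsertBy_cons]
    rcases List.pairwise_cons.mp h with ⟨hy, hys⟩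
    by_cases hxy : pvLt x y = true
    · simp only [hxy, if_pos]
      refine List.pairwise_cons.mpr ⟨?_, h⟩
      intro z hz
      rcases List.mem_cons.mp hz with rfl | hz'
      · exact pvLt_true_pvR hxy
      · exact pvR_trans (pvLt_true_pvR hxy) (hy z hz')
    · have hxy' : pvLt x y = false := Bool.eq_false_iff.mpr hxy
      simp only [hxy', Bool.false_eq_true, if_false]
      refine List.pairwise_cons.mpr ⟨?_, ih hys⟩
      intro z hz
      rcases (PySem.List.mem_insertBy pvLt x z ys).mp hz with rfl | hz'
      · exact hxy'
      · exact hy z hz'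

theorem pvPairwise_foldl (xs acc : List (Char × Char)) (h : acc.Pairwise pvR) :
    (xs.foldl (fun acc x => PySem.List.insertBy pvLt x acc) acc).Pairwise pvR := by
  induction xs generalizing acc with
  | nil => simpa using h
  | cons x xs ih => exact ih _ (pvPairwise_insertBy x acc h)

theorem pvSorted2_pairwise (xs : List (Char × Char)) :
    (PySem.List.sorted2 xs Prod.fst Prod.snd false).Pairwise pvR := by
  have hdef : PySem.List.sorted2 xs Prod.fst Prod.snd false =
      xs.foldl (fun acc x => PySem.List.insertBy pvLt x acc) [] := rfl
  rw [hdef]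
  exact pvPairwise_foldl xs [] (List.Pairwise.nil)

def pvHasPair (l : List (Char × Char)) : Prop :=
  ∃ x ∈ l, ∃ y ∈ l, x.1 = y.1 ∧ x.2 ≠ y.2

theorem pvAdjScan_imp (l : List (Char × Char)) (h : pvAdjScan l = true) : pvHasPair l := by
  induction l with
  | nil => simp [pvAdjScan] at h
  | cons p t ih =>
    cases t with
    | nil => simp [pvAdjScan] at h
    | cons q t' =>
      rw [pvAdjScan] at h
      split_ifs at h with hc
      · simp only [Bool.and_eq_true, beq_iff_eq, Bool.not_eq_true', beq_eq_false_iff_ne] at hc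
        exact ⟨p, by simp, q, by simp, hc.1, hc.2⟩
      · obtain ⟨x, hx, y, hy, hxy⟩ := ih h
        exact ⟨x, List.mem_cons_of_mem p hx, y, List.mem_cons_of_mem p hy, hxy⟩

theorem pvNoAdj (l : List (Char × Char)) (hp : l.Pairwise pvR) (hs : pvAdjScan l = false) :
    ∀ x ∈ l, ∀ y ∈ l, x.1 = y.1 → x.2 = y.2 := by
  induction l with
  | nil => simp
  | cons p t ih =>
    cases t with
    | nil =>
      intro x hx y hy hxy
      rcases List.mem_singleton.mp hx with rfl
      rcases List.mem_singleton.mp hy with rfl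
      rfl
    | cons q t' =>
      rw [pvAdjScan] at hs
      split_ifs at hs with hc
      have hc' : p.1 = q.1 → p.2 = q.2 := by
        intro h12
        by_contra hne
        exact hc (by simp [h12, hne])
      rcases List.pairwise_cons.mp hp with ⟨hpq, htail⟩
      have ihq := ih htail hs
      have key : ∀ y ∈ q :: t', p.1 = y.1 → p.2 = y.2 := by
        intro y hy heq
        have h1 : p.1 ≤ q.1 := pvR_fst (hpq q (by simp))
        have h2 : q.1 ≤ y.1 := by
          rcases List.mem_cons.mp hy with rfl | hy'
          · exact le_refl _
          · exact pvR_fst ((List.pairwise_cons.mp htail).1 y hy')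
        have hq1 : p.1 = q.1 := le_antisymm h1 (heq ▸ h2)
        have hpq2 : p.2 = q.2 := hc' hq1
        have hq1y : q.1 = y.1 := hq1 ▸ heq
        exact hpq2.trans (ihq q (by simp) y hy hq1y)
      intro x hx y hy hxy
      rcases List.mem_cons.mp hx with rfl | hx' <;> rcases List.mem_cons.mp hy with rfl | hy'
      · rfl
      · exact key y hy' hxy
      · exact (key x hx' hxy.symm).symm
      · exact ihq x hx' y hy' hxy

theorem pvAdjScan_iff (l : List (Char × Char)) (hp : l.Pairwise pvR) :
    pvAdjScan l = true ↔ pvHasPair l := by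
  constructor
  · exact pvAdjScan_imp l
  · intro ⟨x, hx, y, hy, h1, h2⟩
    by_contra hscan
    exact h2 (pvNoAdj l hp (Bool.eq_false_iff.mpr hscan) x hx y hy h1)

theorem pvB_iff (hand : List String) :
    SR3_alt hand = true ↔ pvHasPair (hand.map pvCardKey) := by
  unfold SR3_alt
  rw [pvAdjScan_iff _ (pvSorted2_pairwise _)]
  unfold pvHasPair
  have hperm := PySem.List.sorted2_perm (hand.map pvCardKey) Prod.fst Prod.snd false
  simp only [hperm.mem_iff]

theorem pvA_iff (hand : List String) :
    SR3 hand = true ↔ pvHasPair (hand.map pvCardKey) := by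
  unfold SR3
  simp only [List.any_eq_true, PySem.List.mem_pyRange_one, Bool.and_eq_true, beq_iff_eq,
    Bool.not_eq_true', beq_eq_false_iff_ne]
  constructor
  · rintro ⟨i, ⟨hi0, hin⟩, j, ⟨hij, hjn⟩, hr, hs⟩
    have hj0 : 0 ≤ j := by omega
    have hiN : i.toNat < hand.length := by omega
    have hjN : j.toNat < hand.length := by omega
    rw [PySem.List.pyGetD_eq_getElem _ _ hi0 (by simpa using hin),
        PySem.List.pyGetD_eq_getElem _ _ hj0 (by simpa using hjn)] at hr hs
    simp only [List.getElem_map] at hr hs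
    refine ⟨pvCardKey (hand[i.toNat]'hiN), List.mem_map_of_mem (List.getElem_mem hiN),
        pvCardKey (hand[j.toNat]'hjN), List.mem_map_of_mem (List.getElem_mem hjN), ?_, ?_⟩
    · exact hr
    · exact hs
  · rintro ⟨x, hx, y, hy, h1, h2⟩
    obtain ⟨a, ha, hxa⟩ := List.getElem_of_mem hx
    obtain ⟨b, hb, hyb⟩ := List.getElem_of_mem hy
    rw [List.length_map] at ha hb
    have e1 : pvCardKey (hand[a]'ha) = x := by simpa using hxa
    have e2 : pvCardKey (hand[b]'hb) = y := by simpa using hyb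
    have hab : a ≠ b := by
      intro heq
      subst heq
      exact h2 (congrArg Prod.snd (e1.symm.trans e2))
    -- the condition is symmetric in the two cards, so take the smaller index first
    rcases lt_or_gt_of_ne hab with hlt | hlt
    · refine ⟨(a : Int), ⟨Int.natCast_nonneg a, by exact_mod_cast ha⟩,
        (b : Int), ⟨by exact_mod_cast hlt, by exact_mod_cast hb⟩, ?_, ?_⟩
      · rw [PySem.List.pyGetD_eq_getElem _ _ (Int.natCast_nonneg a) (by simpa using ha),
            PySem.List.pyGetD_eq_getElem _ _ (Int.natCast_nonneg b) (by simpa using hb)]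
        simp only [Int.toNat_natCast, List.getElem_map]
        have : (pvCardKey (hand[a]'ha)).1 = (pvCardKey (hand[b]'hb)).1 := by
          rw [e1, e2]; exact h1
        exact this
      · rw [PySem.List.pyGetD_eq_getElem _ _ (Int.natCast_nonneg a) (by simpa using ha),
            PySem.List.pyGetD_eq_getElem _ _ (Int.natCast_nonneg b) (by simpa using hb)]
        simp only [Int.toNat_natCast, List.getElem_map]
        have : (pvCardKey (hand[a]'ha)).2 ≠ (pvCardKey (hand[b]'hb)).2 := by
          rw [e1, e2]; exact h2
        exact this
    · refine ⟨(b : Int), ⟨Int.natCast_nonneg b, by exact_mod_cast hb⟩,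
        (a : Int), ⟨by exact_mod_cast hlt, by exact_mod_cast ha⟩, ?_, ?_⟩
      · rw [PySem.List.pyGetD_eq_getElem _ _ (Int.natCast_nonneg b) (by simpa using hb),
            PySem.List.pyGetD_eq_getElem _ _ (Int.natCast_nonneg a) (by simpa using ha)]
        simp only [Int.toNat_natCast, List.getElem_map]
        have : (pvCardKey (hand[b]'hb)).1 = (pvCardKey (hand[a]'ha)).1 := by
          rw [e1, e2]; exact h1.symm
        exact this
      · rw [PySem.List.pyGetD_eq_getElem _ _ (Int.natCast_nonneg b) (by simpa using hb),
            PySem.List.pyGetD_eq_getElem _ _ (Int.natCast_nonneg a) (by simpa using ha)]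
        simp only [Int.toNat_natCast, List.getElem_map]
        have : (pvCardKey (hand[b]'hb)).2 ≠ (pvCardKey (hand[a]'ha)).2 := by
          rw [e1, e2]; exact (Ne.symm h2)
        exact this

-- ===== VERDICT (by name: the statement is the Claim_ definition above) =====
theorem SR3_spec : Claim_equal_SR3 := by
  intro hand _ _
  unfold Spec_SR3
  have h := (pvA_iff hand).trans (pvB_iff hand).symm
  exact Bool.eq_iff_iff.mpr h
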